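-- pv_equiv track=rewrite | github.com/BoothGroup/Vayesta | vayesta/lattmod/latt.py | get_tiles_order
-- ===== SOURCE A (Python) =====
-- def get_tiles_order(nsites, tiles):
--     assert(nsites[0] % tiles[0] == 0)
--     assert(nsites[1] % tiles[1] == 0)
--     ntiles = [nsites[0] // tiles[0], nsites[1] // tiles[1]]
--     tsize = tiles[0]*tiles[1]
--
--     def get_xy(site):
--         tile, pos = divmod(site, tsize)
--         ty, tx = divmod(tile, ntiles[0])
--         py, px = divmod(pos, tiles[0])
--         return tx*tiles[0]+px, ty*tiles[1]+py
--
--     nsite = nsites[0]*nsites[1]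
--     order = []
--     for site in range(nsite):
--         x, y = get_xy(site)
--         idx = y*nsites[0] + x
--         order.append(idx)
--     return order
-- ===== SOURCE B (Python) =====
-- def get_tiles_order(nsites, tiles):
--     assert(nsites[0] % tiles[0] == 0)
--     assert(nsites[1] % tiles[1] == 0)
--     ntx = nsites[0] // tiles[0]
--     nty = nsites[1] // tiles[1]
--     order = []
--     for ty in range(nty):
--         for tx in range(ntx):
--             for py in range(tiles[1]):
--                 for px in range(tiles[0]):
--                     order.append((ty*tiles[1]+py)*nsites[0] + tx*tiles[0]+px)
--     return order
-- ===== Notes on version B (the rewrite author's own statement) =====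
-- stated objective: alternative
-- what changed: Replaces the single linear site loop that floor-divmod-decodes every site index via the get_xy helper with four nested loops over tile rows, tile columns and in-tile coordinates that build each index by multiplication and addition, with no division at all.
-- intended difference: On degenerate lattices (a negative tile extent, or both site extents negative, while nsites[0]*nsites[1] > 0) A returns an accidental list of invalid floor-divmod-decoded site indices; B returns the empty ordering, the sensible result for a lattice with no real sites. — e.g. on get_tiles_order((2, 2), (-1, -1)): A returns [0, 3, 2, 5], B returns []
import Mathlib
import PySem

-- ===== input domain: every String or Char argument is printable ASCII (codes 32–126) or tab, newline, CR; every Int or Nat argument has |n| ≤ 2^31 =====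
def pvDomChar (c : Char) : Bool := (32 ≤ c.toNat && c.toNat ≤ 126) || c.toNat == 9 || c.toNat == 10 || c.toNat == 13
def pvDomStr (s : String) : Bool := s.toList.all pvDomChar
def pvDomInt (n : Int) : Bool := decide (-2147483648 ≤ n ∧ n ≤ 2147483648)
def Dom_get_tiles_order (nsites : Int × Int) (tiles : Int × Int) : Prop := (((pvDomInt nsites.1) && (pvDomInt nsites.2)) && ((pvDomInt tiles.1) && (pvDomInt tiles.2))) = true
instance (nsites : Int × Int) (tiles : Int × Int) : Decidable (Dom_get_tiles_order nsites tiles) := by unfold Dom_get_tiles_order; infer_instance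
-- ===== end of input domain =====

-- B replaces the per-site divmod decoding with four nested loops that build each
-- index by multiplication and addition (alternative decomposition, same cost).

-- ===== PORT A =====
-- literal port of Source A: ntiles/tsize, the divmod-decoding helper get_xy, and one
-- linear loop over range(nsite) appending y*nsites[0]+x.
def get_tiles_order (nsites : Int × Int) (tiles : Int × Int) : List Int :=
  let ntiles0 : Int := PySem.Int.floordiv nsites.1 tiles.1
  let tsize : Int := tiles.1 * tiles.2
  let get_xy : Int → Int × Int := fun site =>
    let tile := PySem.Int.floordiv site tsize
    let pos := PySem.Int.mod site tsize
    let ty := PySem.Int.floordiv tile ntiles0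
    let tx := PySem.Int.mod tile ntiles0
    let py := PySem.Int.floordiv pos tiles.1
    let px := PySem.Int.mod pos tiles.1
    (tx * tiles.1 + px, ty * tiles.2 + py)
  let nsite := nsites.1 * nsites.2
  (PySem.List.pyRange 0 nsite 1).foldl (fun order site =>
    let xy := get_xy site
    let idx := xy.2 * nsites.1 + xy.1
    order ++ [idx]) []

-- ===== PORT B =====
-- literal port of Source B: four nested for-loops over range, appending
-- (ty*tiles[1]+py)*nsites[0] + tx*tiles[0]+px.
def get_tiles_order_alt (nsites : Int × Int) (tiles : Int × Int) : List Int :=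
  let ntx : Int := PySem.Int.floordiv nsites.1 tiles.1
  let nty : Int := PySem.Int.floordiv nsites.2 tiles.2
  (PySem.List.pyRange 0 nty 1).foldl (fun o1 ty =>
    (PySem.List.pyRange 0 ntx 1).foldl (fun o2 tx =>
      (PySem.List.pyRange 0 tiles.2 1).foldl (fun o3 py =>
        (PySem.List.pyRange 0 tiles.1 1).foldl (fun o4 px =>
          o4 ++ [(ty * tiles.2 + py) * nsites.1 + tx * tiles.1 + px]) o3) o2) o1) []

-- ===== PRECONDITION & SPEC =====
-- Pre_ is exactly where the Python A returns normally: tiles[i] = 0 raises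
-- ZeroDivisionError and a non-divisible extent fails A's asserts (AssertionError).
def Pre_get_tiles_order (nsites : Int × Int) (tiles : Int × Int) : Prop :=
  tiles.1 ≠ 0 ∧ tiles.2 ≠ 0 ∧
  PySem.Int.mod nsites.1 tiles.1 = 0 ∧ PySem.Int.mod nsites.2 tiles.2 = 0
instance (nsites : Int × Int) (tiles : Int × Int) : Decidable (Pre_get_tiles_order nsites tiles) := by unfold Pre_get_tiles_order; infer_instance
def pvWitness_get_tiles_order : (Int × Int) × (Int × Int) := ((4, 6), (2, 3))

-- On degenerate lattices (a negative tile extent, or both site extents negative, while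
-- nsites[0]*nsites[1] > 0) A returns an accidental list of invalid floor-divmod-decoded
-- site indices, whereas B returns the empty ordering, the sensible result for a lattice
-- with no real sites.
def D_get_tiles_order (nsites : Int × Int) (tiles : Int × Int) : Prop :=
  0 < nsites.1 * nsites.2 ∧ ¬(0 < tiles.1 ∧ 0 < tiles.2 ∧ 0 ≤ nsites.1 ∧ 0 ≤ nsites.2)
instance (nsites : Int × Int) (tiles : Int × Int) : Decidable (D_get_tiles_order nsites tiles) := by unfold D_get_tiles_order; infer_instance

def Spec_get_tiles_order (nsites : Int × Int) (tiles : Int × Int) (out : List Int) : Prop := ¬ D_get_tiles_order nsites tiles → out = get_tiles_order_alt nsites tiles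
instance (nsites : Int × Int) (tiles : Int × Int) (out : List Int) : Decidable (Spec_get_tiles_order nsites tiles out) := by unfold Spec_get_tiles_order; infer_instance

def pvDiffWitness_get_tiles_order : (Int × Int) × (Int × Int) := ((2, 2), (-1, -1))
def pvDiffWitnessOut_get_tiles_order : (List Int) × (List Int) := ([0, 3, 2, 5], [])

-- ===== CLAIM (what is proved, stated in full; the proofs are below) =====
def Claim_unchanged_get_tiles_order : Prop := ∀ (nsites : Int × Int) (tiles : Int × Int), Dom_get_tiles_order nsites tiles → Pre_get_tiles_order nsites tiles → Spec_get_tiles_order nsites tiles (get_tiles_order nsites tiles)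
def Claim_changed_get_tiles_order : Prop := Dom_get_tiles_order (pvDiffWitness_get_tiles_order.1) (pvDiffWitness_get_tiles_order.2) ∧ Pre_get_tiles_order (pvDiffWitness_get_tiles_order.1) (pvDiffWitness_get_tiles_order.2) ∧ D_get_tiles_order (pvDiffWitness_get_tiles_order.1) (pvDiffWitness_get_tiles_order.2) ∧ get_tiles_order (pvDiffWitness_get_tiles_order.1) (pvDiffWitness_get_tiles_order.2) = pvDiffWitnessOut_get_tiles_order.1 ∧ get_tiles_order_alt (pvDiffWitness_get_tiles_order.1) (pvDiffWitness_get_tiles_order.2) = pvDiffWitnessOut_get_tiles_order.2 ∧ pvDiffWitnessOut_get_tiles_order.1 ≠ pvDiffWitnessOut_get_tiles_order.2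
def Claim_exact_get_tiles_order : Prop := ∀ (nsites : Int × Int) (tiles : Int × Int), Dom_get_tiles_order nsites tiles → Pre_get_tiles_order nsites tiles → D_get_tiles_order nsites tiles → get_tiles_order nsites tiles ≠ get_tiles_order_alt nsites tiles

-- ===== LEMMAS AND PROOFS =====

-- range (a*b) enumerated as a nested loop (Nat version)
theorem pv_range_mul_flatMap (a b : Nat) :
    List.range (a * b) = (List.range a).flatMap (fun i => (List.range b).map (fun j => i * b + j)) := by
  induction a with
  | zero => simp
  | succ n ih =>
      rw [Nat.succ_mul, List.range_add, ih, List.range_succ, List.flatMap_append]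
      simp

-- the same for Python's range over Int, 0 ≤ a, 0 ≤ b
theorem pv_pyRange_mul (a b : Int) (ha : 0 ≤ a) (hb : 0 ≤ b) :
    PySem.List.pyRange 0 (a * b) 1 =
      (PySem.List.pyRange 0 a 1).flatMap (fun i => (PySem.List.pyRange 0 b 1).map (fun j => i * b + j)) := by
  obtain ⟨A, rfl⟩ := Int.eq_ofNat_of_zero_le ha
  obtain ⟨B, rfl⟩ := Int.eq_ofNat_of_zero_le hb
  rw [PySem.List.pyRange_one, PySem.List.pyRange_one, PySem.List.pyRange_one]
  simp only [Int.sub_zero, Int.zero_add, Int.toNat_natCast]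
  rw [show ((A : Int) * B).toNat = A * B by exact_mod_cast Int.toNat_natCast (A*B), pv_range_mul_flatMap, List.map_flatMap,
      List.flatMap_map]
  refine List.flatMap_congr (fun i _ => ?_)
  rw [List.map_map, List.map_map]
  refine List.map_congr_left (fun j _ => ?_)
  simp only [Function.comp_apply]
  push_cast
  ring

-- floordiv of an exact multiple, any nonzero divisor
theorem pv_floordiv_mul (b q : Int) (hb : b ≠ 0) : PySem.Int.floordiv (b * q) b = q := by
  have hm : PySem.Int.mod (b * q) b = 0 := (PySem.Int.mod_eq_zero_iff_dvd _ _).mpr (dvd_mul_right b q)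
  have h := PySem.Int.floordiv_mul_add_mod (b * q) b
  rw [hm, add_zero] at h
  exact mul_right_cancel₀ hb (h.trans (mul_comm b q))

-- ===== VERDICT (by name: the statement is the Claim_ definition above) =====
theorem get_tiles_order_spec : Claim_unchanged_get_tiles_order := by
  intro ns ts _ hpre hnd
  obtain ⟨hT1, hT2, hm1, hm2⟩ := hpre
  obtain ⟨q1, hq1⟩ := (PySem.Int.mod_eq_zero_iff_dvd _ _).mp hm1
  obtain ⟨q2, hq2⟩ := (PySem.Int.mod_eq_zero_iff_dvd _ _).mp hm2
  unfold get_tiles_order get_tiles_order_alt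
  simp only [hq1, hq2, pv_floordiv_mul ts.1 q1 hT1, pv_floordiv_mul ts.2 q2 hT2,
    PySem.List.foldl_append_singleton_eq_map, PySem.List.foldl_append_eq_flatMap,
    List.nil_append]
  by_cases hP : ts.1 * q1 * (ts.2 * q2) ≤ 0
  · -- no sites: A's range is empty, and some of B's loop ranges is empty
    have hA := PySem.List.pyRange_one_eq_nil hP
    rcases hT1.lt_or_gt with h1 | h1
    · simp [hA, PySem.List.pyRange_one_eq_nil (le_of_lt h1)]
    · rcases hT2.lt_or_gt with h2 | h2
      · simp [hA, PySem.List.pyRange_one_eq_nil (le_of_lt h2)]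
      · have hq : q1 ≤ 0 ∨ q2 ≤ 0 := by
          by_contra hc
          push Not at hc
          nlinarith [mul_pos (mul_pos h1 hc.1) (mul_pos h2 hc.2)]
        rcases hq with hq | hq
        · simp [hA, PySem.List.pyRange_one_eq_nil hq]
        · simp [hA, PySem.List.pyRange_one_eq_nil hq]
  · -- some sites: ¬D forces the regular lattice case
    have hmain : 0 < ts.1 ∧ 0 < ts.2 ∧ 0 ≤ ns.1 ∧ 0 ≤ ns.2 := by
      unfold D_get_tiles_order at hnd
      push Not at hnd
      exact hnd (by rw [hq1, hq2]; omega)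
    obtain ⟨hT1p, hT2p, hn1, hn2⟩ := hmain
    rw [hq1] at hn1
    rw [hq2] at hn2
    have hq1nn : 0 ≤ q1 := by nlinarith
    have hq2nn : 0 ≤ q2 := by nlinarith
    rw [show ts.1 * q1 * (ts.2 * q2) = q2 * (q1 * (ts.2 * ts.1)) from by ring]
    simp only [pv_pyRange_mul q2 (q1 * (ts.2 * ts.1)) hq2nn (by positivity),
      pv_pyRange_mul q1 (ts.2 * ts.1) hq1nn (by positivity),
      pv_pyRange_mul ts.2 ts.1 hT2p.le hT1p.le,
      List.map_flatMap, List.map_map]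
    refine List.flatMap_congr (fun ty hty => ?_)
    refine List.flatMap_congr (fun tx htx => ?_)
    refine List.flatMap_congr (fun py hpy => ?_)
    refine List.map_congr_left (fun px hpx => ?_)
    rw [PySem.List.mem_pyRange_one] at hty htx hpy hpx
    simp only [Function.comp_apply]
    have hq1p : 0 < q1 := lt_of_le_of_lt htx.1 htx.2
    have htile : PySem.Int.floordiv (ty * (q1 * (ts.2 * ts.1)) + (tx * (ts.2 * ts.1) + (py * ts.1 + px))) (ts.1 * ts.2) = ty * q1 + tx := by
      rw [PySem.Int.floordiv_eq_iff_of_pos (by positivity)]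
      constructor <;> nlinarith [hty.1, hty.2, htx.1, htx.2, hpy.1, hpy.2, hpx.1, hpx.2]
    have hposv : PySem.Int.mod (ty * (q1 * (ts.2 * ts.1)) + (tx * (ts.2 * ts.1) + (py * ts.1 + px))) (ts.1 * ts.2) = py * ts.1 + px := by
      have h := PySem.Int.floordiv_mul_add_mod (ty * (q1 * (ts.2 * ts.1)) + (tx * (ts.2 * ts.1) + (py * ts.1 + px))) (ts.1 * ts.2)
      rw [htile] at h
      linear_combination h
    have htyv : PySem.Int.floordiv (ty * q1 + tx) q1 = ty := by
      rw [PySem.Int.floordiv_eq_iff_of_pos hq1p]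
      constructor <;> nlinarith [htx.1, htx.2]
    have htxv : PySem.Int.mod (ty * q1 + tx) q1 = tx := by
      have h := PySem.Int.floordiv_mul_add_mod (ty * q1 + tx) q1
      rw [htyv] at h
      linear_combination h
    have hpyv : PySem.Int.floordiv (py * ts.1 + px) ts.1 = py := by
      rw [PySem.Int.floordiv_eq_iff_of_pos hT1p]
      constructor <;> nlinarith [hpx.1, hpx.2]
    have hpxv : PySem.Int.mod (py * ts.1 + px) ts.1 = px := by
      have h := PySem.Int.floordiv_mul_add_mod (py * ts.1 + px) ts.1
      rw [hpyv] at h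
      linear_combination h
    rw [htile, hposv, htyv, htxv, hpyv, hpxv]
    ring

theorem get_tiles_order_changed : Claim_changed_get_tiles_order := by
  unfold Claim_changed_get_tiles_order
  decide

theorem get_tiles_order_tight : Claim_exact_get_tiles_order := by
  intro ns ts _ hpre hd
  obtain ⟨hT1, hT2, hm1, hm2⟩ := hpre
  obtain ⟨hpos, hdeg⟩ := hd
  obtain ⟨q1, hq1⟩ := (PySem.Int.mod_eq_zero_iff_dvd _ _).mp hm1
  obtain ⟨q2, hq2⟩ := (PySem.Int.mod_eq_zero_iff_dvd _ _).mp hm2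
  unfold get_tiles_order get_tiles_order_alt
  simp only [hq1, hq2, pv_floordiv_mul ts.1 q1 hT1, pv_floordiv_mul ts.2 q2 hT2,
    PySem.List.foldl_append_singleton_eq_map, PySem.List.foldl_append_eq_flatMap,
    List.nil_append]
  -- B is the empty list on every degenerate lattice …
  have hB : ∀ l : List Int,
      l.flatMap (fun ty => (PySem.List.pyRange 0 q1 1).flatMap (fun tx =>
        (PySem.List.pyRange 0 ts.2 1).flatMap (fun py =>
          (PySem.List.pyRange 0 ts.1 1).map (fun px =>
            (ty * ts.2 + py) * (ts.1 * q1) + tx * ts.1 + px)))) = [] := by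
    intro l
    rcases hT1.lt_or_gt with h1 | h1
    · simp [PySem.List.pyRange_one_eq_nil (le_of_lt h1)]
    · rcases hT2.lt_or_gt with h2 | h2
      · simp [PySem.List.pyRange_one_eq_nil (le_of_lt h2)]
      · have hq : q1 ≤ 0 := by
          rw [hq1, hq2] at hdeg hpos
          by_contra hc
          push Not at hc
          rcases le_or_gt 0 (ts.2 * q2) with hy | hy
          · exact hdeg ⟨h1, h2, le_of_lt (mul_pos h1 hc), hy⟩
          · nlinarith [mul_pos h1 hc]
        simp [PySem.List.pyRange_one_eq_nil hq]
  rw [hB]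
  -- … while A maps over a nonempty range of sites
  rw [PySem.List.pyRange_one_cons (by rw [hq1, hq2] at hpos; omega)]
  simp
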